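-- pv_equiv track=rewrite | github.com/RaquelFonseca/P1 | Unidade6a10/copa.py | joga_em
-- ===== SOURCE A (Python) =====
-- def joga_em(selecao, cidade, grupos, estadios):
-- 	for grupo in grupos:
-- 		if selecao in grupos[grupo]:
-- 			for estadio in estadios:
-- 				if grupo == estadio[0] or grupo == estadio[1]:
-- 					if cidade in estadios[estadio]:
-- 						return True
-- 	return False
-- ===== SOURCE B (Python) =====
-- def joga_em(selecao, cidade, grupos, estadios):
--     # Index-first: collect the groups playing in `cidade`, then test team membership.
--     candidatos = set()
--     for chave in estadios:
--         if cidade in estadios[chave]: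
--             candidatos.add(chave[0])
--             candidatos.add(chave[1])
--     return any(g in candidatos and selecao in grupos[g] for g in grupos)
-- ===== Notes on version B (the rewrite author's own statement) =====
-- stated objective: alternative
-- what changed: Reversed traversal: one pass over the stadiums builds the set of groups that play in the city, then a single scan of the groups tests team membership, replacing A's nested scan of all stadiums for every group containing the team.
import Mathlib
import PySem

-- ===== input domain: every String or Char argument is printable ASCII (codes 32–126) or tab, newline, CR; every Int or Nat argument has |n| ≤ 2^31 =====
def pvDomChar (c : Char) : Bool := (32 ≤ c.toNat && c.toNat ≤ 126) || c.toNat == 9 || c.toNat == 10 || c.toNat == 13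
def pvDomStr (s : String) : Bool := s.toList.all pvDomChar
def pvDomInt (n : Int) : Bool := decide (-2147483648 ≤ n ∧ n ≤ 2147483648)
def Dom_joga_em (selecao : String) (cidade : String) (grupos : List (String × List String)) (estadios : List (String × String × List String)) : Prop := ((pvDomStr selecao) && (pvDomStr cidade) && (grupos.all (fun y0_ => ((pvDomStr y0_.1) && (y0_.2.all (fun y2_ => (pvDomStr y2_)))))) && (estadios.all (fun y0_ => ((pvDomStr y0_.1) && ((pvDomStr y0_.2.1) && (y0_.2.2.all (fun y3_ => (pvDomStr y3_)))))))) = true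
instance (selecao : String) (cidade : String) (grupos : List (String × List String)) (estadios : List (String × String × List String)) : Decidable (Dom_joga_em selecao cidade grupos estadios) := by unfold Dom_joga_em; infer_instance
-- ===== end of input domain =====

-- B reverses the traversal: it first builds the set of groups whose stadium lies in the
-- city, then scans the groups once for the team; same O(|grupos|*|estadios|)-free result.

-- ===== PORT A =====
-- grupos[grupo]: first-match association lookup (Python dict lookup; key always present when called)
def pvLookupGrp (grupos : List (String × List String)) (k : String) : List String :=
  match grupos with
  | [] => []
  | (g, ts) :: rest => if k == g then ts else pvLookupGrp rest k

-- estadios[estadio]: first-match lookup by the (group, group) key pair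
def pvLookupEst (estadios : List (String × String × List String)) (k1 k2 : String) : List String :=
  match estadios with
  | [] => []
  | (g1, g2, cs) :: rest => if k1 == g1 && k2 == g2 then cs else pvLookupEst rest k1 k2

-- inner 'for estadio in estadios' loop of A
def pvLoopEst (cidade grupo : String) (full : List (String × String × List String)) :
    List (String × String × List String) → Bool
  | [] => false
  | (g1, g2, _) :: rest =>
      if grupo == g1 || grupo == g2 then
        if (pvLookupEst full g1 g2).contains cidade then true
        else pvLoopEst cidade grupo full rest
      else pvLoopEst cidade grupo full rest

-- outer 'for grupo in grupos' loop of A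
def pvLoopGrp (selecao cidade : String) (grupos : List (String × List String))
    (estadios : List (String × String × List String)) :
    List (String × List String) → Bool
  | [] => false
  | (g, _) :: rest =>
      if (pvLookupGrp grupos g).contains selecao then
        if pvLoopEst cidade g estadios estadios then true
        else pvLoopGrp selecao cidade grupos estadios rest
      else pvLoopGrp selecao cidade grupos estadios rest

def joga_em (selecao : String) (cidade : String) (grupos : List (String × List String)) (estadios : List (String × String × List String)) : Bool :=
  pvLoopGrp selecao cidade grupos estadios grupos

-- ===== PORT B =====
def joga_em_alt (selecao : String) (cidade : String) (grupos : List (String × List String)) (estadios : List (String × String × List String)) : Bool :=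
  let candidatos : PySem.Set String :=
    estadios.foldl (fun s e =>
      if (pvLookupEst estadios e.1 e.2.1).contains cidade then
        PySem.Set.add (PySem.Set.add s e.1) e.2.1
      else s) PySem.Set.empty
  grupos.any (fun g =>
    PySem.Set.contains candidatos g.1 && (pvLookupGrp grupos g.1).contains selecao)

-- ===== PRECONDITION & SPEC =====
def Spec_joga_em (selecao : String) (cidade : String) (grupos : List (String × List String)) (estadios : List (String × String × List String)) (out : Bool) : Prop := out = joga_em_alt selecao cidade grupos estadios
instance (selecao : String) (cidade : String) (grupos : List (String × List String)) (estadios : List (String × String × List String)) (out : Bool) : Decidable (Spec_joga_em selecao cidade grupos estadios out) := by unfold Spec_joga_em; infer_instance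

-- ===== CLAIM (what is proved, stated in full; the proofs are below) =====
def Claim_equal_joga_em : Prop := ∀ (selecao : String) (cidade : String) (grupos : List (String × List String)) (estadios : List (String × String × List String)), Dom_joga_em selecao cidade grupos estadios → Spec_joga_em selecao cidade grupos estadios (joga_em selecao cidade grupos estadios)

-- ===== LEMMAS AND PROOFS =====

theorem pvLoopEst_eq_any (cidade grupo : String) (full l : List (String × String × List String)) :
    pvLoopEst cidade grupo full l =
      l.any (fun e => (grupo == e.1 || grupo == e.2.1) &&
        (pvLookupEst full e.1 e.2.1).contains cidade) := by
  induction l with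
  | nil => rfl
  | cons e rest ih =>
      obtain ⟨g1, g2, cs⟩ := e
      simp only [pvLoopEst, List.any_cons, ih]
      by_cases h1 : (grupo == g1 || grupo == g2) = true <;>
        by_cases h2 : (pvLookupEst full g1 g2).contains cidade = true <;>
        simp [h1, h2]

theorem pvLoopGrp_eq_any (selecao cidade : String) (grupos : List (String × List String))
    (estadios : List (String × String × List String)) (l : List (String × List String)) :
    pvLoopGrp selecao cidade grupos estadios l =
      l.any (fun p => (pvLookupGrp grupos p.1).contains selecao &&
        pvLoopEst cidade p.1 estadios estadios) := by
  induction l with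
  | nil => rfl
  | cons p rest ih =>
      obtain ⟨g, ts⟩ := p
      simp only [pvLoopGrp, List.any_cons, ih]
      by_cases h1 : (pvLookupGrp grupos g).contains selecao = true <;>
        by_cases h2 : pvLoopEst cidade g estadios estadios = true <;>
        simp [h1, h2]

theorem contains_add (s : PySem.Set String) (x y : String) :
    (PySem.Set.add s x).contains y = (s.contains y || y == x) := by
  simp only [PySem.Set.contains_eq_listContains]
  by_cases h : y ∈ PySem.Set.add s x
  · rw [PySem.Set.mem_add] at h
    rcases h with h | h <;> simp [PySem.Set.mem_add, h]
  · have h' := h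
    rw [PySem.Set.mem_add] at h'
    push Not at h'
    simp [List.contains_eq_mem, h, h'.1, h'.2]

theorem contains_fold (cidade : String) (full : List (String × String × List String))
    (l : List (String × String × List String)) (s : PySem.Set String) (g : String) :
    (l.foldl (fun s e =>
      if (pvLookupEst full e.1 e.2.1).contains cidade then
        PySem.Set.add (PySem.Set.add s e.1) e.2.1
      else s) s).contains g =
      (s.contains g || l.any (fun e => (g == e.1 || g == e.2.1) &&
        (pvLookupEst full e.1 e.2.1).contains cidade)) := by
  induction l generalizing s with
  | nil => simp
  | cons e rest ih =>
      simp only [List.foldl_cons, List.any_cons]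
      by_cases h : (pvLookupEst full e.1 e.2.1).contains cidade = true
      · rw [if_pos h, ih, contains_add, contains_add, h]
        cases hs : s.contains g <;> cases h1 : g == e.1 <;> cases h2 : g == e.2.1 <;> simp
      · rw [if_neg h, ih]
        have hd : decide (cidade ∈ pvLookupEst full e.1 e.2.1) = false := by
          simpa using h
        simp [hd]

-- ===== VERDICT (by name: the statement is the Claim_ definition above) =====
theorem joga_em_spec : Claim_equal_joga_em := by
  intro selecao cidade grupos estadios _
  show joga_em selecao cidade grupos estadios = joga_em_alt selecao cidade grupos estadios
  unfold joga_em joga_em_alt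
  rw [pvLoopGrp_eq_any]
  refine List.any_congr rfl (fun p => ?_)
  rw [contains_fold, pvLoopEst_eq_any]
  simp [Bool.and_comm]
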